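-- pv_equiv track=rewrite | github.com/RelaxDanny/CodingAcademy | Lectures/05-11-ans.py | solution
-- ===== SOURCE A (Python) =====
-- def solution(A):
--     count = 0
--     count_list = []
--     for i in range(len(A)):
--         count = 0
--         for j in range(0, len(A)):
--             if i != j:
--                 if A[i] == 1 and A[j] == 6:
--                     count += 2
--                 elif A[i] == 2 and A[j] == 5:
--                     count += 2
--                 elif A[i] == 3 and A[j] == 4:
--                     count += 2
--                 elif A[i] == 4 and A[j] == 3:
--                     count += 2
--                 elif A[i] == 5 and A[j] == 2:
--                     count += 2
--                 elif A[i] == 6 and A[j] == 1: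
--                     count += 2
--                 elif A[i] == A[j] and A[j] == A[i]:
--                     count += 0
--                 elif A[i] != A[j] and A[j] != A[i]:
--                     count += 1
--             else:
--                 pass
--         count_list.append(count)
--     return min(count_list)
-- ===== SOURCE B (Python) =====
-- def solution(A):
--     cnt = {}
--     for v in A:
--         cnt[v] = cnt.get(v, 0) + 1
--     n = len(A)
--     return min(n - c + (cnt.get(7 - v, 0) if 1 <= v <= 6 else 0)
--                for v, c in cnt.items())
-- ===== Notes on version B (the rewrite author's own statement) =====
-- stated objective: faster
-- what changed: Replaces the quadratic all-pairs index scan by a single frequency-table pass: each value's score is n - freq[v] + freq[7-v] (complement lookup), minimised over the distinct values.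
import Mathlib
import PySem

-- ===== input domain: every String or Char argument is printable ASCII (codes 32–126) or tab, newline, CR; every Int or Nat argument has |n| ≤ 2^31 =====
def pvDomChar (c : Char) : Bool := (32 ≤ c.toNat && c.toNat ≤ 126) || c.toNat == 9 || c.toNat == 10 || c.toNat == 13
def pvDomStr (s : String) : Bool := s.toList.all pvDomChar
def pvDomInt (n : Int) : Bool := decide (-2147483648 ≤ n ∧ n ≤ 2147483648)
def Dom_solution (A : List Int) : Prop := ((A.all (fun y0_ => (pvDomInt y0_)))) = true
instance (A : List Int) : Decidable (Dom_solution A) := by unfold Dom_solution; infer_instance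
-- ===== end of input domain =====

-- B replaces A's O(n^2) all-pairs index scan by one frequency table and a per-value
-- complement lookup (O(n)); proved to return the same minimum on every nonempty list.

-- ===== PORT A =====
def solution (A : List Int) : Int :=
  let countList :=
    (PySem.List.pyRange 0 (PySem.List.len A)).foldl (fun cl i =>
      let count :=
        (PySem.List.pyRange 0 (PySem.List.len A)).foldl (fun c j =>
          if i ≠ j then
            let ai := PySem.List.pyGetD A i 0
            let aj := PySem.List.pyGetD A j 0
            if ai = 1 ∧ aj = 6 then c + 2
            else if ai = 2 ∧ aj = 5 then c + 2
            else if ai = 3 ∧ aj = 4 then c + 2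
            else if ai = 4 ∧ aj = 3 then c + 2
            else if ai = 5 ∧ aj = 2 then c + 2
            else if ai = 6 ∧ aj = 1 then c + 2
            else if ai = aj ∧ aj = ai then c + 0
            else if ai ≠ aj ∧ aj ≠ ai then c + 1
            else c
          else c) 0
      cl ++ [count]) []
  (PySem.List.min? countList (fun x => x)).getD 0

-- ===== PORT B =====
def solution_alt (A : List Int) : Int :=
  let cnt := A.foldl (fun d v => d.insert v (d.getD v 0 + 1)) PySem.Dict.empty
  let n : Int := PySem.List.len A
  (PySem.List.min?
    (cnt.items.map (fun p =>
      n - p.2 + (if 1 ≤ p.1 ∧ p.1 ≤ 6 then cnt.getD (7 - p.1) 0 else 0)))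
    (fun x => x)).getD 0

-- ===== PRECONDITION & SPEC =====
-- Python's min raises ValueError on an empty sequence, in both A and B.
def Pre_solution (A : List Int) : Prop := A ≠ []
instance (A : List Int) : Decidable (Pre_solution A) := by unfold Pre_solution; infer_instance
def pvWitness_solution : List Int := [1, 6, 2]
def Spec_solution (A : List Int) (out : Int) : Prop := out = solution_alt A
instance (A : List Int) (out : Int) : Decidable (Spec_solution A out) := by unfold Spec_solution; infer_instance

-- ===== CLAIM (what is proved, stated in full; the proofs are below) =====
def Claim_equal_solution : Prop := ∀ (A : List Int), Dom_solution A → Pre_solution A → Spec_solution A (solution A)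

-- ===== LEMMAS AND PROOFS =====

-- pairwise weight of A's inner branch chain, split into its two additive parts
def wgt (v x : Int) : Int :=
  (if x = v then 0 else 1) + (if 1 ≤ v ∧ v ≤ 6 ∧ x = 7 - v then 1 else 0)

-- per-value score both programs compute
def score (A : List Int) (v : Int) : Int :=
  (A.length : Int) - (A.count v : Int) +
    (if 1 ≤ v ∧ v ≤ 6 then (A.count (7 - v) : Int) else 0)

theorem wgt_self (v : Int) : wgt v v = 0 := by
  unfold wgt; split_ifs with h1 h2 <;> omega

theorem chain_eq_wgt (c ai aj : Int) :
    (if ai = 1 ∧ aj = 6 then c + 2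
     else if ai = 2 ∧ aj = 5 then c + 2
     else if ai = 3 ∧ aj = 4 then c + 2
     else if ai = 4 ∧ aj = 3 then c + 2
     else if ai = 5 ∧ aj = 2 then c + 2
     else if ai = 6 ∧ aj = 1 then c + 2
     else if ai = aj ∧ aj = ai then c + 0
     else if ai ≠ aj ∧ aj ≠ ai then c + 1
     else c) = c + wgt ai aj := by
  unfold wgt; split_ifs <;> omega

theorem sum_map_indicator (v : Int) (A : List Int) :
    (A.map (fun x => if x = v then (0 : Int) else 1)).sum
      = (A.length : Int) - (A.count v : Int) := by
  induction A with
  | nil => simp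
  | cons a t ih =>
    by_cases h : a = v
    · simp [h, ih]
    · simp [h, ih]
      omega

theorem sum_map_wgt (v : Int) (A : List Int) :
    (A.map (wgt v)).sum = score A v := by
  unfold wgt score
  rw [show (fun x => (if x = v then (0:Int) else 1) + (if 1 ≤ v ∧ v ≤ 6 ∧ x = 7 - v then (1:Int) else 0))
        = fun x => (fun x => if x = v then (0:Int) else 1) x + (fun x => if 1 ≤ v ∧ v ≤ 6 ∧ x = 7 - v then (1:Int) else 0) x from rfl]
  rw [PySem.List.sum_map_add_int, sum_map_indicator]
  by_cases hv : 1 ≤ v ∧ v ≤ 6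
  · have : (A.map (fun x => if 1 ≤ v ∧ v ≤ 6 ∧ x = 7 - v then (1:Int) else 0))
        = A.map (fun x => if (x == 7 - v) = true then (1:Int) else 0) := by
      apply List.map_congr_left; intro x _
      by_cases hx : x = 7 - v <;> simp [hx, hv.1, hv.2]
    rw [this, PySem.List.sum_map_ite_one_zero]
    simp [hv.1, hv.2, List.count]
  · have : (A.map (fun x => if 1 ≤ v ∧ v ≤ 6 ∧ x = 7 - v then (1:Int) else 0))
        = A.map (fun _ => (0:Int)) := by
      apply List.map_congr_left; intro x _
      simp only [ite_eq_right_iff]; intro h; exact absurd ⟨h.1, h.2.1⟩ hv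
    rw [this]
    simp [hv]

-- A's inner loop over j computes score A (A[i]) for any valid position i
theorem inner_loop_eq (A : List Int) (v : Int) (i : Int)
    (hi : PySem.List.pyGetD A i 0 = v) :
    (PySem.List.pyRange 0 (PySem.List.len A)).foldl (fun c j =>
        if i ≠ j then
          let ai := PySem.List.pyGetD A i 0
          let aj := PySem.List.pyGetD A j 0
          if ai = 1 ∧ aj = 6 then c + 2
          else if ai = 2 ∧ aj = 5 then c + 2
          else if ai = 3 ∧ aj = 4 then c + 2
          else if ai = 4 ∧ aj = 3 then c + 2
          else if ai = 5 ∧ aj = 2 then c + 2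
          else if ai = 6 ∧ aj = 1 then c + 2
          else if ai = aj ∧ aj = ai then c + 0
          else if ai ≠ aj ∧ aj ≠ ai then c + 1
          else c
        else c) 0 = score A v := by
  rw [PySem.List.foldl_congr_mem _ _
      (fun c j => c + wgt v (PySem.List.pyGetD A j 0)) 0 ?_]
  · rw [PySem.List.foldl_add]
    rw [show (fun j => wgt v (PySem.List.pyGetD A j 0))
          = (wgt v) ∘ (fun j => PySem.List.pyGetD A j 0) from rfl]
    rw [← List.map_map, PySem.List.map_pyGetD_pyRange_zero, sum_map_wgt]
    omega
  · intro c j _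
    by_cases hij : i = j
    · simp only [hij, ne_eq, not_true_eq_false, if_false]
      rw [← hij, hi]
      have := wgt_self v
      omega
    · simp only [ne_eq, hij, not_false_eq_true, if_true, hi]
      exact chain_eq_wgt c v (PySem.List.pyGetD A j 0)

-- min over a list (key = identity) depends only on membership
theorem min_getD_congr (xs ys : List Int)
    (hmem : ∀ a, a ∈ xs ↔ a ∈ ys) (hne : xs ≠ []) :
    (PySem.List.min? xs (fun x => x)).getD 0
      = (PySem.List.min? ys (fun x => x)).getD 0 := by
  obtain ⟨m, hm⟩ : ∃ m, PySem.List.min? xs (fun x => x) = some m := by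
    cases h : PySem.List.min? xs (fun x => x) with
    | none => exact absurd ((PySem.List.min?_eq_none_iff xs _).mp h) hne
    | some m => exact ⟨m, rfl⟩
  have hys : ys ≠ [] := by
    intro h; subst h
    exact (List.not_mem_nil ((hmem _).mp (PySem.List.min?_mem hm)))
  obtain ⟨m', hm'⟩ : ∃ m', PySem.List.min? ys (fun x => x) = some m' := by
    cases h : PySem.List.min? ys (fun x => x) with
    | none => exact absurd ((PySem.List.min?_eq_none_iff ys _).mp h) hys
    | some m' => exact ⟨m', rfl⟩
  rw [hm, hm']
  have h1 := PySem.List.min?_isMin hm m' ((hmem m').mpr (PySem.List.min?_mem hm'))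
  have h2 := PySem.List.min?_isMin hm' m ((hmem m).mp (PySem.List.min?_mem hm))
  simpa using le_antisymm h1 h2

-- ===== VERDICT (by name: the statement is the Claim_ definition above) =====
theorem solution_spec : Claim_equal_solution := by
  intro A _ hpre
  unfold Spec_solution solution solution_alt
  simp only [PySem.Dict.foldl_insert_getD_add_one_eq_counter]
  rw [PySem.List.foldl_congr_mem _ _
      (fun cl i => cl ++ [score A (PySem.List.pyGetD A i 0)]) [] ?_]
  · rw [PySem.List.foldl_append_singleton_eq_map, List.nil_append]
    rw [show (fun i => score A (PySem.List.pyGetD A i 0))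
          = (score A) ∘ (fun i => PySem.List.pyGetD A i 0) from rfl]
    rw [← List.map_map, PySem.List.map_pyGetD_pyRange_zero]
    rw [PySem.Dict.items_counter, List.map_map]
    have hcand : ((fun p : Int × Int =>
          (PySem.List.len A : Int) - p.2 +
            (if 1 ≤ p.1 ∧ p.1 ≤ 6 then (PySem.Dict.counter A).getD (7 - p.1) 0 else 0))
          ∘ fun k => (k, (List.count k A : Int)))
        = score A := by
      funext k
      simp only [Function.comp_apply, PySem.Dict.getD_counter, score, PySem.List.len]
    rw [hcand]
    apply min_getD_congr
    · intro a
      simp [List.mem_map, PySem.Set.mem_ofList]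
    · have hpre' : A ≠ [] := hpre
      simpa using hpre'
  · intro cl i hi
    congr 1
    exact congrArg (fun c => [c])
      (inner_loop_eq A (PySem.List.pyGetD A i 0) i rfl)
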